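-- pv_equiv track=rewrite | github.com/vitorkiyoshi/python-algorithms | tarefa10/bordas.py | destacar_bordas
-- ===== SOURCE A (Python) =====
-- def destacar_bordas(largura, altura, imagem):
--     ImagemOriginal=[[0 for _ in range(largura)] for _ in range(altura)]
--     for i in range(len(ImagemOriginal)):
--         for j in range(len(ImagemOriginal[i])):
--             ImagemOriginal[i][j]=imagem[i][j]
--     for i in range(1, altura - 1, +1):
--         for j in range(1, largura - 1, +1):
--             igualdade = 0
--             if ImagemOriginal[i][j] == '1':
--                 if ImagemOriginal[i+1][j]== '1':
--                     igualdade += 1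
--                 if ImagemOriginal[i+1][j+1]== '1':
--                     igualdade += 1
--                 if ImagemOriginal[i][j+1] == '1':
--                     igualdade += 1
--                 if ImagemOriginal[i-1][j+1] == '1':
--                     igualdade += 1
--                 if ImagemOriginal[i-1][j]=='1':
--                     igualdade += 1
--                 if ImagemOriginal[i-1][j-1]=='1':
--                     igualdade += 1
--                 if ImagemOriginal[i][j-1]=='1':
--                     igualdade += 1
--                 if ImagemOriginal[i+1][j-1] == '1':
--                     igualdade +=1
--                 if igualdade==8:
--                     imagem[i][j]='0'
--     return imagem
-- ===== SOURCE B (Python) =====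
-- def destacar_bordas(largura, altura, imagem):
--     # Separable erosion: a horizontal 1-D pass builds, per row, a mask of
--     # positions whose 3 horizontal cells are all '1'; then a vertical pass
--     # ANDs three consecutive row masks and zeroes the marked pixels.
--     # Mutates imagem in place (same writes as the original) and returns it.
--     h = []
--     for i in range(altura):
--         row = [imagem[i][j] == '1' for j in range(largura)]
--         h.append([a and b and c for a, b, c in zip(row, row[1:], row[2:])])
--     for i in range(1, altura - 1):
--         up, mid, dn = h[i - 1], h[i], h[i + 1]
--         for k in range(len(mid)):
--             if up[k] and mid[k] and dn[k]:
--                 imagem[i][k + 1] = '0'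
--     return imagem
-- ===== Notes on version B (the rewrite author's own statement) =====
-- stated objective: alternative
-- what changed: B replaces A's copy-then-per-pixel-3x3-counter scan by separable erosion: a horizontal 1-D pass builds a per-row mask of positions whose three horizontal cells are all '1' (zip of the row with its two shifts), then a vertical pass ANDs three consecutive row masks and zeroes the marked pixels, so no cell is tested against its 8 neighbours and no full matrix copy is made.
import Mathlib
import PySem

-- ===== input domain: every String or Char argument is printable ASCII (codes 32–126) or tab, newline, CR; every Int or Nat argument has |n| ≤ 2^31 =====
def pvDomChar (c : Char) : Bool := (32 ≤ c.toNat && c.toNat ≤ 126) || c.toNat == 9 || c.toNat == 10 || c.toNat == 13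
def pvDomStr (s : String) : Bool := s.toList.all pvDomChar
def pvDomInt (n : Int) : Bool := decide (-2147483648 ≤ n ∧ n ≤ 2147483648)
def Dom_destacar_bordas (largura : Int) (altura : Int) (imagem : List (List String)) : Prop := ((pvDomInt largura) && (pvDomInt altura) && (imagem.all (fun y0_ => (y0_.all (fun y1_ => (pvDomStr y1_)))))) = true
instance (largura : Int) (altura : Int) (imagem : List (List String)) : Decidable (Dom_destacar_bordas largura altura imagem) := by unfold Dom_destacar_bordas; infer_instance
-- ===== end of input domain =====

-- B replaces A's per-pixel 3x3 counter scan by separable erosion: a horizontal 1-D pass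
-- builds one all-three-horizontal-'1' mask per row, a vertical pass ANDs three consecutive
-- row masks and zeroes the marked pixels (no full matrix copy, no 8-way counter).
-- Both Pythons mutate `imagem` in place with the same writes; the theorem is about the
-- return value.

-- ===== PORT A =====
-- m[i][j], total form of the Python read; only used where Pre_ guarantees the index is in range
def pvRead (m : List (List String)) (i j : Int) : String :=
  PySem.List.pyGetD (PySem.List.pyGetD m i []) j ""

-- m[i][j] = v
def pvWrite (m : List (List String)) (i j : Int) (v : String) : List (List String) :=
  PySem.List.pySetD m i (PySem.List.pySetD (PySem.List.pyGetD m i []) j v)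

-- the copy phase of A: ImagemOriginal built and then filled cell by cell.
-- (Python seeds the cells with int 0; every cell is overwritten by the copy loop on every
-- admitted input, so the seed "" is never read.)
def pvCopy (largura altura : Int) (imagem : List (List String)) : List (List String) :=
  let orig0 : List (List String) :=
    (PySem.List.pyRange 0 altura 1).map (fun _ => (PySem.List.pyRange 0 largura 1).map (fun _ => ""))
  (PySem.List.pyRange 0 (orig0.length : Int) 1).foldl (fun O i =>
    (PySem.List.pyRange 0 ((PySem.List.pyGetD O i []).length : Int) 1).foldl (fun O j =>
      pvWrite O i j (pvRead imagem i j)) O) orig0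

-- the body of A's interior double loop: the igualdade counter and the conditional write
def pvStep (orig img : List (List String)) (i j : Int) : List (List String) :=
  let igualdade : Int := 0
  if pvRead orig i j == "1" then
    let igualdade := if pvRead orig (i+1) j == "1" then igualdade + 1 else igualdade
    let igualdade := if pvRead orig (i+1) (j+1) == "1" then igualdade + 1 else igualdade
    let igualdade := if pvRead orig i (j+1) == "1" then igualdade + 1 else igualdade
    let igualdade := if pvRead orig (i-1) (j+1) == "1" then igualdade + 1 else igualdade
    let igualdade := if pvRead orig (i-1) j == "1" then igualdade + 1 else igualdade
    let igualdade := if pvRead orig (i-1) (j-1) == "1" then igualdade + 1 else igualdade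
    let igualdade := if pvRead orig i (j-1) == "1" then igualdade + 1 else igualdade
    let igualdade := if pvRead orig (i+1) (j-1) == "1" then igualdade + 1 else igualdade
    if igualdade == 8 then pvWrite img i j "0" else img
  else img

def destacar_bordas (largura : Int) (altura : Int) (imagem : List (List String)) : List (List String) :=
  let orig := pvCopy largura altura imagem
  (PySem.List.pyRange 1 (altura - 1) 1).foldl (fun img i =>
    (PySem.List.pyRange 1 (largura - 1) 1).foldl (fun img j =>
      pvStep orig img i j) img) imagem

-- ===== PORT B =====
-- horizontal pass for one row: row of (cell == '1'), then zip(row, row[1:], row[2:]) ANDed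
def pvMaskRow (largura : Int) (imagem : List (List String)) (i : Int) : List Bool :=
  let row := (PySem.List.pyRange 0 largura 1).map (fun j => pvRead imagem i j == "1")
  (row.zip ((row.drop 1).zip (row.drop 2))).map (fun p => p.1 && p.2.1 && p.2.2)

def destacar_bordas_alt (largura : Int) (altura : Int) (imagem : List (List String)) : List (List String) :=
  let h : List (List Bool) :=
    (PySem.List.pyRange 0 altura 1).foldl (fun h i => h ++ [pvMaskRow largura imagem i]) []
  (PySem.List.pyRange 1 (altura - 1) 1).foldl (fun img i =>
    let up := PySem.List.pyGetD h (i - 1) []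
    let mid := PySem.List.pyGetD h i []
    let dn := PySem.List.pyGetD h (i + 1) []
    (PySem.List.pyRange 0 (mid.length : Int) 1).foldl (fun img k =>
      if PySem.List.pyGetD up k false && PySem.List.pyGetD mid k false && PySem.List.pyGetD dn k false
      then pvWrite img i (k + 1) "0" else img) img) imagem

-- ===== PRECONDITION & SPEC =====
-- Pre_ excludes exactly the inputs where A raises IndexError while filling the copy:
-- positive dimensions with fewer than `altura` rows, or a row among the first `altura`
-- rows shorter than `largura`.
def Pre_destacar_bordas (largura : Int) (altura : Int) (imagem : List (List String)) : Prop :=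
  altura ≤ 0 ∨ largura ≤ 0 ∨
    (altura ≤ (imagem.length : Int) ∧
      ∀ row ∈ imagem.take altura.toNat, largura ≤ (row.length : Int))
instance (largura : Int) (altura : Int) (imagem : List (List String)) : Decidable (Pre_destacar_bordas largura altura imagem) := by unfold Pre_destacar_bordas; infer_instance
def pvWitness_destacar_bordas : Int × Int × List (List String) :=
  (3, 3, [["1","1","1"], ["1","1","1"], ["1","1","1"]])

def Spec_destacar_bordas (largura : Int) (altura : Int) (imagem : List (List String)) (out : List (List String)) : Prop := out = destacar_bordas_alt largura altura imagem
instance (largura : Int) (altura : Int) (imagem : List (List String)) (out : List (List String)) : Decidable (Spec_destacar_bordas largura altura imagem out) := by unfold Spec_destacar_bordas; infer_instance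

-- ===== CLAIM (what is proved, stated in full; the proofs are below) =====
def Claim_equal_destacar_bordas : Prop := ∀ (largura : Int) (altura : Int) (imagem : List (List String)), Dom_destacar_bordas largura altura imagem → Pre_destacar_bordas largura altura imagem → Spec_destacar_bordas largura altura imagem (destacar_bordas largura altura imagem)

-- ===== LEMMAS AND PROOFS =====

theorem pv_getD_append_length {α : Type} (pre : List α) (x : α) (t : List α) (d : α) :
    (pre ++ x :: t).getD pre.length d = x := by
  simp [List.getD]

theorem pv_set_append_length {α : Type} (pre : List α) (x : α) (t : List α) (v : α) :
    (pre ++ x :: t).set pre.length v = pre ++ v :: t := by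
  simp

-- a loop 'for j in range(n): r[j] = g(j, r[j])' rewrites the first n cells
theorem pv_foldl_set_range {α : Type} (d : α) (g : Nat → α → α) (F : List α → Nat → List α)
    (hF : ∀ (r : List α) (i : Nat), i < r.length → F r i = r.set i (g i (r.getD i d))) :
    ∀ (n : Nat) (r : List α), n ≤ r.length →
      (List.range n).foldl F r
        = ((List.range n).map (fun j => g j (r.getD j d))) ++ r.drop n := by
  intro n
  induction n with
  | zero => simp
  | succ n ih =>
    intro r hn
    rw [List.range_succ, List.foldl_append, List.map_append, ih r (by omega)]
    obtain ⟨x, t, hxt⟩ : ∃ x t, r.drop n = x :: t :=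
      ⟨r[n], r.drop (n+1), (List.getElem_cons_drop (by omega)).symm⟩
    have hx : r.getD n d = x := by
      simp only [List.getD, ← List.head?_drop, hxt, Option.getD_some, List.head?_cons]
    have ht : r.drop (n+1) = t := by
      have h2 : (r.drop n).tail = t := by rw [hxt]; rfl
      simpa [List.tail_drop] using h2
    set pre := (List.range n).map (fun j => g j (r.getD j d)) with hpre
    have hlen : pre.length = n := by simp [hpre]
    simp only [List.foldl_cons, List.foldl_nil, hxt, ht]
    rw [hF _ n (by simp only [List.length_append, List.length_cons, hlen]; omega)]
    rw [← hlen] at hx ⊢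
    rw [pv_getD_append_length, pv_set_append_length]
    simp [← hx]

-- a loop that only writes into row i of a matrix is that row's loop, then one row update
theorem pv_row_extract {α : Type} (i : Nat) (f : Nat → α) :
    ∀ (js : List Nat) (O : List (List α)), i < O.length →
      js.foldl (fun O' j => O'.set i ((O'.getD i []).set j (f j))) O
        = O.set i (js.foldl (fun r j => r.set j (f j)) (O.getD i [])) := by
  intro js
  induction js with
  | nil =>
    intro O hO
    simp only [List.foldl_nil]
    rw [List.getD_eq_getElem _ _ hO, List.set_getElem_self]
  | cons j js ih =>
    intro O hO
    simp only [List.foldl_cons]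
    rw [ih _ (by simpa using hO)]
    have h1 : (O.set i ((O.getD i []).set j (f j))).getD i [] = (O.getD i []).set j (f j) := by
      rw [List.getD_eq_getElem _ _ (by simpa using hO), List.getElem_set_self]
    rw [h1, List.set_set]

-- A's copy phase is the altura × largura matrix of (total-form) reads of imagem
theorem pvCopy_eq (largura altura : Int) (imagem : List (List String))
    (ha : 0 ≤ altura) (hl : 0 ≤ largura) :
    pvCopy largura altura imagem
      = (List.range altura.toNat).map (fun (i : Nat) =>
          (List.range largura.toNat).map (fun (j : Nat) => pvRead imagem (i : Int) (j : Int))) := by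
  obtain ⟨h, rfl⟩ : ∃ h : Nat, altura = (h : Int) := ⟨altura.toNat, (Int.toNat_of_nonneg ha).symm⟩
  obtain ⟨w, rfl⟩ : ∃ w : Nat, largura = (w : Int) := ⟨largura.toNat, (Int.toNat_of_nonneg hl).symm⟩
  simp only [Int.toNat_natCast]
  unfold pvCopy
  simp only [PySem.List.pyRange_zero_nat, List.length_map, List.length_range]
  rw [List.foldl_map]
  rw [pv_foldl_set_range (d := []) (g := fun i r =>
        (List.range r.length).foldl (fun r' j => r'.set j (pvRead imagem (i : Int) (j : Int))) r)
      (F := _) ?hF h _ (by simp)]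
  case hF =>
    intro O i hO
    simp only [PySem.List.pyGetD_natCast]
    rw [List.foldl_map]
    simp only [pvWrite, PySem.List.pyGetD_natCast, PySem.List.pySetD_natCast]
    exact pv_row_extract i _ _ O hO
  · have horig : List.map (fun _ => List.map (fun _ => ("" : String)) (List.map (fun (k : Nat) => (k : Int)) (List.range w)))
        (List.map (fun (k : Nat) => (k : Int)) (List.range h)) = List.replicate h (List.replicate w "") := by
      simp [Function.comp_def, List.map_const']
    rw [horig, List.drop_replicate]
    simp only [Nat.sub_self, List.replicate_zero, List.append_nil]
    apply List.map_congr_left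
    intro i hi
    have hi' : i < h := List.mem_range.mp hi
    have h0 : (List.replicate h (List.replicate w ("" : String))).getD i [] = List.replicate w "" := by
      rw [List.getD_eq_getElem _ _ (by simpa using hi'), List.getElem_replicate]
    rw [h0, List.length_replicate]
    rw [pv_foldl_set_range (d := "") (g := fun j _ => pvRead imagem (i : Int) (j : Int))
        (F := _) (fun r j hj => rfl) _ _ (by simp)]
    simp

-- reading the copy anywhere inside the declared frame is reading imagem
theorem pvCopy_read (largura altura : Int) (imagem : List (List String)) (a b : Int)
    (ha0 : 0 ≤ a) (ha1 : a < altura) (hb0 : 0 ≤ b) (hb1 : b < largura) :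
    pvRead (pvCopy largura altura imagem) a b = pvRead imagem a b := by
  rw [pvCopy_eq _ _ _ (by omega) (by omega)]
  obtain ⟨a', rfl⟩ : ∃ n : Nat, a = (n : Int) := ⟨a.toNat, (Int.toNat_of_nonneg ha0).symm⟩
  obtain ⟨b', rfl⟩ : ∃ n : Nat, b = (n : Int) := ⟨b.toNat, (Int.toNat_of_nonneg hb0).symm⟩
  conv_lhs => rw [pvRead]
  simp only [PySem.List.pyGetD_natCast]
  rw [PySem.List.getD_map_range _ _ _ _ (by omega)]
  rw [PySem.List.getD_map_range _ _ _ _ (by omega)]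

-- A's mutation step is: test all 9 cells of the 3x3 block, then write
theorem pvStep_eq (M img : List (List String)) (i j : Int) :
    pvStep M img i j =
      if ((pvRead M (i-1) (j-1) == "1" && (pvRead M (i-1) j == "1" && pvRead M (i-1) (j+1) == "1"))
          && ((pvRead M i (j-1) == "1" && (pvRead M i j == "1" && pvRead M i (j+1) == "1"))
              && (pvRead M (i+1) (j-1) == "1" && (pvRead M (i+1) j == "1" && pvRead M (i+1) (j+1) == "1"))))
      then pvWrite img i j "0" else img := by
  unfold pvStep
  generalize (pvRead M (i-1) (j-1) == "1") = p
  generalize (pvRead M (i-1) j == "1") = q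
  generalize (pvRead M (i-1) (j+1) == "1") = r
  generalize (pvRead M i (j-1) == "1") = s
  generalize (pvRead M i j == "1") = t
  generalize (pvRead M i (j+1) == "1") = u
  generalize (pvRead M (i+1) (j-1) == "1") = v
  generalize (pvRead M (i+1) j == "1") = x
  generalize (pvRead M (i+1) (j+1) == "1") = y
  cases p <;> cases q <;> cases r <;> cases s <;> cases t <;> cases u <;> cases v <;> cases x <;> cases y <;> simp

-- the append-accumulating build of B's mask list is a map
theorem pv_foldl_append_map {α β : Type} (f : α → β) :
    ∀ (l : List α) (acc : List β),
      l.foldl (fun acc x => acc ++ [f x]) acc = acc ++ l.map f := by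
  intro l
  induction l with
  | nil => simp
  | cons x t ih => intro acc; simp [ih]

theorem pv_h_eq (largura altura : Int) (imagem : List (List String)) :
    (PySem.List.pyRange 0 altura 1).foldl (fun h i => h ++ [pvMaskRow largura imagem i]) []
      = (PySem.List.pyRange 0 altura 1).map (pvMaskRow largura imagem) := by
  rw [pv_foldl_append_map]
  simp

theorem pvMaskRow_length (largura : Int) (imagem : List (List String)) (i : Int) :
    (pvMaskRow largura imagem i).length = largura.toNat - 2 := by
  simp [pvMaskRow, PySem.List.length_pyRange_one]
  omega

theorem pvMaskRow_getD (largura : Int) (imagem : List (List String)) (i k : Int)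
    (hk0 : 0 ≤ k) (hk : k < (((largura.toNat - 2 : Nat) : Int))) :
    PySem.List.pyGetD (pvMaskRow largura imagem i) k false
      = (pvRead imagem i k == "1" && pvRead imagem i (k+1) == "1" && pvRead imagem i (k+2) == "1") := by
  obtain ⟨kn, rfl⟩ : ∃ n : Nat, k = (n : Int) := ⟨k.toNat, (Int.toNat_of_nonneg hk0).symm⟩
  have hkn : kn < largura.toNat - 2 := by omega
  rw [PySem.List.pyGetD_eq_getElem _ false (by omega)
      (by rw [pvMaskRow_length]; omega)]
  unfold pvMaskRow
  have hrl : ((PySem.List.pyRange 0 largura 1).map (fun j => pvRead imagem i j == "1")).length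
      = largura.toNat := by
    simp [PySem.List.length_pyRange_one]
  simp only [Int.toNat_natCast, List.getElem_map, List.getElem_zip, List.getElem_drop]
  rw [PySem.List.getElem_pyRange_one, PySem.List.getElem_pyRange_one, PySem.List.getElem_pyRange_one]
  have e1 : ((0:Int) + (kn:Int)) = (kn:Int) := by ring
  have e2 : ((0:Int) + ((1+kn:Nat):Int)) = (kn:Int) + 1 := by push_cast; ring
  have e3 : ((0:Int) + ((2+kn:Nat):Int)) = (kn:Int) + 2 := by push_cast; ring
  rw [e1, e2, e3]

-- the interior column range 1..largura-2 is the shift of B's 0-based mask index range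
theorem pv_range_shift (w : Int) :
    PySem.List.pyRange 1 (w - 1) 1
      = (PySem.List.pyRange 0 (((w.toNat - 2 : Nat) : Int)) 1).map (fun k => k + 1) := by
  rw [PySem.List.pyRange_one, PySem.List.pyRange_one, List.map_map]
  have hn : (w - 1 - 1).toNat = ((((w.toNat - 2 : Nat) : Int)) - 0).toNat := by omega
  rw [hn]
  apply List.map_congr_left
  intro t _
  simp [Function.comp]
  omega

-- two left-associated 3x3 groupings of the same nine tests agree
theorem pv_bool9 (p q r s t u v x y : Bool) :
    ((p && (q && r)) && ((s && (t && u)) && (v && (x && y))))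
      = ((p && q && r) && (s && t && u) && (v && x && y)) := by
  cases p <;> cases q <;> cases r <;> cases s <;> cases t <;> cases u <;> cases v <;> cases x <;> cases y <;> rfl

-- ===== VERDICT (by name: the statement is the Claim_ definition above) =====
theorem destacar_bordas_spec : Claim_equal_destacar_bordas := by
  intro largura altura imagem _hdom _hpre
  unfold Spec_destacar_bordas
  simp only [destacar_bordas, destacar_bordas_alt, pv_h_eq]
  apply PySem.List.foldl_congr_mem
  intro img i hi
  obtain ⟨hi1, hi2⟩ := PySem.List.mem_pyRange_one.mp hi
  rw [PySem.List.pyGetD_map_pyRange_of_nonneg _ _ _ _ (by omega) (by omega),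
      PySem.List.pyGetD_map_pyRange_of_nonneg _ _ _ _ (by omega) (by omega),
      PySem.List.pyGetD_map_pyRange_of_nonneg _ _ _ _ (by omega) (by omega)]
  rw [pvMaskRow_length]
  rw [pv_range_shift largura, List.foldl_map]
  apply PySem.List.foldl_congr_mem
  intro img' k hk
  obtain ⟨hk1, hk2⟩ := PySem.List.mem_pyRange_one.mp hk
  rw [pvStep_eq]
  have hR : ∀ a b : Int, i - 1 ≤ a → a ≤ i + 1 → k ≤ b → b ≤ k + 2 →
      pvRead (pvCopy largura altura imagem) a b = pvRead imagem a b := by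
    intro a b h1 h2 h3 h4
    exact pvCopy_read largura altura imagem a b (by omega) (by omega) (by omega) (by omega)
  have ej1 : k + 1 - 1 = k := by ring
  have ej2 : k + 1 + 1 = k + 2 := by ring
  rw [ej1, ej2]
  rw [hR (i-1) k (by omega) (by omega) (by omega) (by omega),
      hR (i-1) (k+1) (by omega) (by omega) (by omega) (by omega),
      hR (i-1) (k+2) (by omega) (by omega) (by omega) (by omega),
      hR i k (by omega) (by omega) (by omega) (by omega),
      hR i (k+1) (by omega) (by omega) (by omega) (by omega),
      hR i (k+2) (by omega) (by omega) (by omega) (by omega),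
      hR (i+1) k (by omega) (by omega) (by omega) (by omega),
      hR (i+1) (k+1) (by omega) (by omega) (by omega) (by omega),
      hR (i+1) (k+2) (by omega) (by omega) (by omega) (by omega)]
  rw [pvMaskRow_getD largura imagem (i-1) k hk1 hk2,
      pvMaskRow_getD largura imagem i k hk1 hk2,
      pvMaskRow_getD largura imagem (i+1) k hk1 hk2]
  rw [pv_bool9]
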